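-- pv_equiv track=rewrite | github.com/zhivvv/dashboard | func.py | rename_dict
-- ===== SOURCE A (Python) =====
-- def rename_dict(a_list: list, dictionary: dict, minscore: int):
--     # if column has not been found or score equals then store name to mapping
--     # todo get rid!
--     score = 0
--     zeros = 0
--     tmp_dict = {}
--     dict_for_rename = {}
--
--     # cols_default = [col for col in column_name.unique().tolist() if str(col) != 'nan']
--     cols_default = [col for col in set(a_list) if str(col) != 'nan']
--     cols_lower = [col.lower() for col in cols_default]
--     for col_1, col_2 in zip(cols_default, cols_lower):
--         for key, val in dictionary.items():
--             for part in val: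
--                 # if col_2.__contains__(part):
--                 if part in col_1:
--                     score += 1
--                 if part in col_2:
--                     score += 1
--             tmp_dict[key] = score
--             score = 0
--
--         for value in tmp_dict.values():
--             if value != 0:
--                 zeros += 1
--
--         if zeros == 0 or max(tmp_dict.values()) < minscore:
--             max_score_name = 'not found'
--         else:
--             max_score_name = max(tmp_dict, key=tmp_dict.get)
--
--         dict_for_rename[col_1] = max_score_name
--         zeros = 0
--         tmp_dict = {}
--
--     return dict_for_rename
-- ===== SOURCE B (Python) =====
-- def _step(parts, key, rec):
--     c, low, s, k = rec
--     ns = sum((p in c) + (p in low) for p in parts)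
--     return (c, low, ns, key) if s < ns else rec
--
-- def rename_dict(a_list: list, dictionary: dict, minscore: int):
--     # Transposed traversal: dictionary keys drive the outer loop; the columns are a
--     # vector of (col, lower, best_score, best_key) records rebuilt pointwise per key.
--     best = [(c, c.lower(), 0, 'not found') for c in set(a_list) if str(c) != 'nan']
--     for key, parts in dictionary.items():
--         best = [_step(parts, key, rec) for rec in best]
--     return {c: k if 0 < s and minscore <= s else 'not found' for c, low, s, k in best}
-- ===== Notes on version B (the rewrite author's own statement) =====
-- stated objective: alternative
-- what changed: B transposes the loop nest: instead of A's column-outer pass that fills a per-column tmp_dict of key scores and then rescans it three times (nonzero count, max, argmax), B iterates the dictionary keys in the outer loop and rebuilds a vector of per-column (best_score, best_key) records pointwise per key, finishing with one comprehension over the records; correct because each column's record evolves independently, so the key-outer fold computes the same first-max per column.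
import Mathlib
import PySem

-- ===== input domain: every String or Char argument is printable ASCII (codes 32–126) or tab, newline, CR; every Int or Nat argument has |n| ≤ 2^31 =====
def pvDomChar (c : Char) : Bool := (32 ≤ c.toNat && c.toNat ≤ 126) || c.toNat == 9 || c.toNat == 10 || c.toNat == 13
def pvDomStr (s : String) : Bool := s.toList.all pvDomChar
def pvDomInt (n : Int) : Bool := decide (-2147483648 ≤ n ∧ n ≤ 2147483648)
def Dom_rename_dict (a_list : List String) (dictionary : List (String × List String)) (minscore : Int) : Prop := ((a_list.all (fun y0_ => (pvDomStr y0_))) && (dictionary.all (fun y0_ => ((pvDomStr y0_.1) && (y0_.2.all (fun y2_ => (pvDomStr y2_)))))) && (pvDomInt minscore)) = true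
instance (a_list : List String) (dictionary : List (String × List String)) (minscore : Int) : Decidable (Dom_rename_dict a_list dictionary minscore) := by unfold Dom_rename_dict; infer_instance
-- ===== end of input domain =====

-- B transposes the loop nest: A runs over the columns, filling a per-column score table
-- (tmp_dict) and rescanning it three times (nonzero count, max of values, argmax of keys);
-- B runs over the dictionary keys in the outer loop, rebuilding a vector of per-column
-- (col, lower, best_score, best_key) records pointwise per key, then emits the result with
-- one final pass. Same result because each column's record evolves independently.
-- Both ports model the iteration over set(a_list) in first-occurrence order (dict outputs
-- are compared ignoring order).

-- ===== PORT A =====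
-- A's innermost loop: 'for part in val: if part in col_1: score += 1; if part in col_2: score += 1'
def pvScoreA (col_1 col_2 : String) (parts : List String) : Int :=
  parts.foldl (fun score part =>
    let score := if PySem.Str.isIn part col_1 then score + 1 else score
    if PySem.Str.isIn part col_2 then score + 1 else score) 0

-- body of A's outer for-loop (one column pair col_1, col_2)
def pvNameA (dictionary : List (String × List String)) (minscore : Int) (col_1 col_2 : String) : String :=
  let tmp_dict : PySem.Dict String Int :=
    dictionary.foldl (fun tmp kv => tmp.insert kv.1 (pvScoreA col_1 col_2 kv.2)) PySem.Dict.empty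
  let zeros : Int := tmp_dict.values.foldl (fun zeros v => if v ≠ 0 then zeros + 1 else zeros) 0
  -- the '.getD' defaults below are only reached when tmp_dict is nonempty (Python's 'or' short-circuits)
  if zeros = 0 ∨ (PySem.List.max? tmp_dict.values (fun v => v)).getD 0 < minscore then "not found"
  else (PySem.List.max? tmp_dict.keys (fun k => tmp_dict.getD k 0)).getD "not found"

def rename_dict (a_list : List String) (dictionary : List (String × List String)) (minscore : Int) : List (String × String) :=
  let cols_default := (PySem.Set.ofList a_list).filter (fun col => col != "nan")
  let cols_lower := cols_default.map PySem.Str.lower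
  ((cols_default.zip cols_lower).foldl (fun (dfr : PySem.Dict String String) cc =>
      dfr.insert cc.1 (pvNameA dictionary minscore cc.1 cc.2)) PySem.Dict.empty).items

-- ===== PORT B =====
-- Source B's score inside _step: sum((p in c) + (p in low) for p in parts)
def pvScoreB (col low : String) (parts : List String) : Int :=
  (parts.map (fun part =>
    (if PySem.Str.isIn part col then (1 : Int) else 0) + (if PySem.Str.isIn part low then 1 else 0))).sum

-- Source B's _step on one (col, lower, best_score, best_key) record
def pvStep (parts : List String) (key : String) (rec : String × String × Int × String) :
    String × String × Int × String :=
  let ns := pvScoreB rec.1 rec.2.1 parts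
  if rec.2.2.1 < ns then (rec.1, rec.2.1, ns, key) else rec

def rename_dict_alt (a_list : List String) (dictionary : List (String × List String)) (minscore : Int) : List (String × String) :=
  let best0 := ((PySem.Set.ofList a_list).filter (fun c => c != "nan")).map
      (fun c => (c, PySem.Str.lower c, (0 : Int), "not found"))
  let best := dictionary.foldl (fun bs kv => bs.map (pvStep kv.2 kv.1)) best0
  (best.foldl (fun (d : PySem.Dict String String) r =>
      d.insert r.1 (if 0 < r.2.2.1 ∧ minscore ≤ r.2.2.1 then r.2.2.2 else "not found"))
    PySem.Dict.empty).items

-- ===== PRECONDITION & SPEC =====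
-- Pre_ requires the dictionary argument's keys to be distinct: it models a Python dict, whose keys are
-- necessarily distinct, so no actual Python input is excluded (an association list with duplicate keys
-- corresponds to no Python dict value).
def Pre_rename_dict (a_list : List String) (dictionary : List (String × List String)) (minscore : Int) : Prop :=
  (dictionary.map Prod.fst).Nodup
instance (a_list : List String) (dictionary : List (String × List String)) (minscore : Int) : Decidable (Pre_rename_dict a_list dictionary minscore) := by unfold Pre_rename_dict; infer_instance

def pvWitness_rename_dict : List String × (List (String × List String)) × Int :=
  (["Price", "nan", "Price"], [("amount", ["pri", "amt"]), ("date", ["dat"])], 1)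

def Spec_rename_dict (a_list : List String) (dictionary : List (String × List String)) (minscore : Int) (out : List (String × String)) : Prop := out = rename_dict_alt a_list dictionary minscore
instance (a_list : List String) (dictionary : List (String × List String)) (minscore : Int) (out : List (String × String)) : Decidable (Spec_rename_dict a_list dictionary minscore out) := by unfold Spec_rename_dict; infer_instance

-- ===== CLAIM (what is proved, stated in full; the proofs are below) =====
def Claim_equal_rename_dict : Prop := ∀ (a_list : List String) (dictionary : List (String × List String)) (minscore : Int), Dom_rename_dict a_list dictionary minscore → Pre_rename_dict a_list dictionary minscore → Spec_rename_dict a_list dictionary minscore (rename_dict a_list dictionary minscore)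

-- ===== LEMMAS AND PROOFS =====

-- first-argmax fold over (key, score) pairs
def pvArgmax (ps : List (String × Int)) (b : String × Int) : String × Int :=
  ps.foldl (fun b kv => if b.2 < kv.2 then kv else b) b

theorem pv_score_fold (col low : String) (parts : List String) (a : Int) :
    parts.foldl (fun score part =>
      let score := if PySem.Str.isIn part col then score + 1 else score
      if PySem.Str.isIn part low then score + 1 else score) a = a + pvScoreB col low parts := by
  induction parts generalizing a with
  | nil => simp [pvScoreB]
  | cons p t ih => simp only [List.foldl_cons, pvScoreB, List.map_cons, List.sum_cons] at *; rw [ih]; split_ifs <;> ring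

theorem pv_scoreAB (col low : String) (parts : List String) :
    pvScoreA col low parts = pvScoreB col low parts := by
  unfold pvScoreA
  rw [pv_score_fold, zero_add]

theorem pv_score_nonneg (col low : String) (parts : List String) : 0 ≤ pvScoreB col low parts := by
  apply List.sum_nonneg; intro x hx
  simp only [List.mem_map] at hx
  obtain ⟨p, -, rfl⟩ := hx
  split_ifs <;> norm_num

theorem pv_items_fold (g : String × List String → Int) :
    ∀ (l : List (String × List String)) (t : PySem.Dict String Int),
      (l.map Prod.fst).Nodup → (∀ k ∈ l.map Prod.fst, t.contains k = false) →
      (l.foldl (fun t kv => t.insert kv.1 (g kv)) t).items = t.items ++ l.map (fun kv => (kv.1, g kv)) := by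
  intro l
  induction l with
  | nil => simp
  | cons kv t ih =>
    intro d hnd hc
    simp only [List.map_cons, List.nodup_cons] at hnd
    have hc0 : d.contains kv.1 = false := hc kv.1 (by simp)
    simp only [List.foldl_cons]
    rw [ih _ hnd.2]
    · rw [PySem.Dict.items_insert_of_not_contains _ _ hc0]; simp
    · intro k hk
      rw [PySem.Dict.contains_insert]
      have hne : k ≠ kv.1 := by rintro rfl; exact hnd.1 hk
      simp [hne, hc k (by simp [hk])]

theorem pv_argmax_snd (ps : List (String × Int)) : ∀ (b : String × Int),
    (pvArgmax ps b).2 = (ps.map Prod.snd).foldl max b.2 := by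
  induction ps with
  | nil => intro b; simp [pvArgmax]
  | cons kv t ih =>
    intro b
    simp only [pvArgmax, List.foldl_cons, List.map_cons] at *
    rw [ih]
    congr 1
    split_ifs with h
    · exact (max_eq_right h.le).symm
    · exact (max_eq_left (not_lt.mp h)).symm

theorem pv_argmax_init_le (ps : List (String × Int)) : ∀ (b : String × Int), b.2 ≤ (pvArgmax ps b).2 := by
  induction ps with
  | nil => intro b; simp [pvArgmax]
  | cons kv t ih =>
    intro b
    simp only [pvArgmax, List.foldl_cons] at *
    refine le_trans ?_ (ih _)
    split_ifs with h
    · exact h.le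
    · exact le_refl _

theorem pv_argmax_mem_le (ps : List (String × Int)) : ∀ (b : String × Int) (p : String × Int), p ∈ ps →
    p.2 ≤ (pvArgmax ps b).2 := by
  induction ps with
  | nil => intro _ _ h; simp at h
  | cons kv t ih =>
    intro b p hp
    simp only [pvArgmax, List.foldl_cons] at *
    rcases List.mem_cons.mp hp with rfl | hp
    · refine le_trans ?_ (pv_argmax_init_le t _)
      split_ifs with h
      · exact le_refl _
      · exact not_lt.mp h
    · exact ih _ p hp

-- the fold's result is either the initial accumulator or a list element
theorem pv_argmax_mem (ps : List (String × Int)) : ∀ (b : String × Int),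
    pvArgmax ps b = b ∨ pvArgmax ps b ∈ ps := by
  induction ps with
  | nil => intro b; left; rfl
  | cons kv t ih =>
    intro b
    simp only [pvArgmax, List.foldl_cons] at *
    rcases ih (if b.2 < kv.2 then kv else b) with h | h
    · rw [h]
      split_ifs with hc
      · right; simp
      · left; rfl
    · right; simp [h]

-- two starts with equal scores either both survive untouched or converge
theorem pv_argmax_tie (ps : List (String × Int)) :
    ∀ (a b : String × Int), a.2 = b.2 →
      (pvArgmax ps a = a ∧ pvArgmax ps b = b) ∨ pvArgmax ps a = pvArgmax ps b := by
  induction ps with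
  | nil => intro a b _; left; exact ⟨rfl, rfl⟩
  | cons kv t ih =>
    intro a b hab
    simp only [pvArgmax, List.foldl_cons]
    by_cases h : a.2 < kv.2
    · right; rw [if_pos h, if_pos (hab ▸ h)]
    · rw [if_neg h, if_neg (hab ▸ h)]
      exact ih a b hab

theorem pv_max?_cons {α : Type} (f : α → Int) (x : α) (t : List α) :
    PySem.List.max? (x :: t) f = some (t.foldl (fun m y => if f m < f y then y else m) x) := by
  suffices h : ∀ (t : List α) (m : α),
      List.foldl (fun acc y => match acc with
        | none => some y
        | some m => if f m < f y then some y else some m) (some m) t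
      = some (t.foldl (fun m y => if f m < f y then y else m) m) by
    simp only [PySem.List.max?, List.foldl_cons]
    exact h t x
  intro t
  induction t with
  | nil => intro m; rfl
  | cons y s ih =>
    intro m
    simp only [List.foldl_cons]
    split_ifs with h <;> simp [ih]

theorem pv_count_zero (l : List Int) :
    (l.foldl (fun zeros v => if v ≠ 0 then zeros + 1 else zeros) (0 : Int) = 0) ↔ ∀ v ∈ l, v = 0 := by
  have h : ∀ (z : Int), l.foldl (fun zeros v => if v ≠ 0 then zeros + 1 else zeros) z
      = z + (l.countP (fun v => v != 0) : Int) := by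
    intro z
    have := PySem.List.foldl_count_if (fun v : Int => v != 0) l z
    simpa using this
  rw [h]
  simp [List.countP_eq_zero]

-- max? over the keys with a lookup key-function is pvArgmax over the pairs
theorem pv_max_keys (keyfn : String → Int) :
    ∀ (rest : List (String × Int)) (b : String × Int),
      (∀ p ∈ rest, keyfn p.1 = p.2) → keyfn b.1 = b.2 →
      (rest.map Prod.fst).foldl (fun m y => if keyfn m < keyfn y then y else m) b.1 = (pvArgmax rest b).1 := by
  intro rest
  induction rest with
  | nil => intro b _ _; rfl
  | cons p t ih =>
    intro b hk hb
    simp only [List.map_cons, List.foldl_cons, pvArgmax]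
    have hp : keyfn p.1 = p.2 := hk p (by simp)
    rw [hb, hp]
    have step : (if b.2 < p.2 then p.1 else b.1) = (if b.2 < p.2 then p else b).1 := by
      split_ifs <;> rfl
    rw [step]
    exact ih (if b.2 < p.2 then p else b) (fun q hq => hk q (by simp [hq]))
      (by split_ifs <;> assumption)

theorem pv_if_max : (fun (m y : Int) => if m < y then y else m) = max := by
  funext m y
  split_ifs with h
  · exact (max_eq_right h.le).symm
  · exact (max_eq_left (not_lt.mp h)).symm

-- A's three scans over the (key, score) pairs agree with a first-argmax with threshold test
theorem pv_core (ps : List (String × Int)) (keyfn : String → Int) (m : Int)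
    (hkey : ∀ p ∈ ps, keyfn p.1 = p.2) (hnn : ∀ p ∈ ps, 0 ≤ p.2) :
    (if ((ps.map Prod.snd).foldl (fun zeros v => if v ≠ 0 then zeros + 1 else zeros) (0 : Int)) = 0
        ∨ (PySem.List.max? (ps.map Prod.snd) (fun v => v)).getD 0 < m
     then "not found"
     else (PySem.List.max? (ps.map Prod.fst) keyfn).getD "not found")
    = (if 0 < (pvArgmax ps ("not found", 0)).2 ∧ m ≤ (pvArgmax ps ("not found", 0)).2
       then (pvArgmax ps ("not found", 0)).1 else "not found") := by
  rcases ps with _ | ⟨p0, rest⟩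
  · simp [pvArgmax]
  · by_cases hall : ∀ v ∈ (p0 :: rest).map Prod.snd, v = 0
    · rw [if_pos (Or.inl ((pv_count_zero _).mpr hall))]
      have hz : (pvArgmax (p0 :: rest) ("not found", 0)).2 = 0 := by
        rcases pv_argmax_mem (p0 :: rest) ("not found", 0) with h | h
        · rw [h]
        · exact hall _ (List.mem_map_of_mem h)
      rw [if_neg (by rw [hz]; rintro ⟨h, -⟩; exact lt_irrefl 0 h)]
    · -- some score is nonzero, hence positive
      have hzc : ¬ ((p0 :: rest).map Prod.snd).foldl (fun zeros v => if v ≠ 0 then zeros + 1 else zeros) (0 : Int) = 0 := by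
        intro h0; exact hall ((pv_count_zero _).mp h0)
      obtain ⟨v, hv, hv0⟩ : ∃ v ∈ (p0 :: rest).map Prod.snd, v ≠ 0 := by
        by_contra hno; push_neg at hno; exact hall hno
      obtain ⟨p, hpmem, rfl⟩ := List.mem_map.mp hv
      have hppos : 0 < p.2 := lt_of_le_of_ne (hnn p hpmem) (Ne.symm hv0)
      have hpos : 0 < (pvArgmax (p0 :: rest) ("not found", 0)).2 :=
        lt_of_lt_of_le hppos (pv_argmax_mem_le _ _ p hpmem)
      -- the max of the values equals the running best score
      have hm2 : (pvArgmax (p0 :: rest) ("not found", 0)).2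
          = (PySem.List.max? ((p0 :: rest).map Prod.snd) (fun v => v)).getD 0 := by
        rw [pv_argmax_snd, List.map_cons, pv_max?_cons, List.foldl_cons]
        have h0 : max (0 : Int) p0.2 = p0.2 := max_eq_right (hnn p0 (by simp))
        simp only [Option.getD_some, h0]
        rw [pv_if_max]
      -- the first argmax key equals max? over the keys
      have hk1 : (PySem.List.max? ((p0 :: rest).map Prod.fst) keyfn).getD "not found"
          = (pvArgmax (p0 :: rest) ("not found", 0)).1 := by
        rw [List.map_cons, pv_max?_cons, Option.getD_some]
        rw [pv_max_keys keyfn rest p0 (fun q hq => hkey q (by simp [hq])) (hkey p0 (by simp))]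
        show (pvArgmax rest p0).1 = (pvArgmax (p0 :: rest) ("not found", 0)).1
        simp only [pvArgmax, List.foldl_cons]
        by_cases h0 : (0 : Int) < p0.2
        · rw [if_pos h0]
        · rw [if_neg h0]
          have hp02 : p0.2 = 0 := le_antisymm (not_lt.mp h0) (hnn p0 (by simp))
          rcases pv_argmax_tie rest p0 ("not found", 0) (by simp [hp02]) with ⟨hfix1, hfix2⟩ | heq
          · -- both fixed: contradicts the strictly positive score p
            exfalso
            rcases List.mem_cons.mp hpmem with rfl | hprest
            · omega
            · have := pv_argmax_mem_le rest p0 p hprest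
              simp only [pvArgmax] at this hfix1
              rw [hfix1] at this
              omega
          · exact congrArg Prod.fst heq
      by_cases hle : m ≤ (pvArgmax (p0 :: rest) ("not found", 0)).2
      · rw [if_neg (by push_neg; exact ⟨hzc, by rw [← hm2]; omega⟩), if_pos ⟨hpos, hle⟩]
        exact hk1
      · rw [if_pos (Or.inr (by rw [← hm2]; omega)), if_neg (by rintro ⟨-, h⟩; exact hle h)]

-- per-column: A's loop body equals the threshold test on B's per-column running best
theorem pv_name_eq (dictionary : List (String × List String)) (minscore : Int) (col low : String)
    (hnd : (dictionary.map Prod.fst).Nodup) :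
    pvNameA dictionary minscore col low
    = (if 0 < (pvArgmax (dictionary.map (fun kv => (kv.1, pvScoreB col low kv.2))) ("not found", 0)).2
          ∧ minscore ≤ (pvArgmax (dictionary.map (fun kv => (kv.1, pvScoreB col low kv.2))) ("not found", 0)).2
       then (pvArgmax (dictionary.map (fun kv => (kv.1, pvScoreB col low kv.2))) ("not found", 0)).1
       else "not found") := by
  have hps : dictionary.map (fun kv => (kv.1, pvScoreA col low kv.2))
      = dictionary.map (fun kv => (kv.1, pvScoreB col low kv.2)) := by
    simp only [pv_scoreAB]
  have hd : dictionary.foldl (fun tmp kv => tmp.insert kv.1 (pvScoreA col low kv.2)) PySem.Dict.empty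
      = PySem.Dict.mk (dictionary.map (fun kv => (kv.1, pvScoreB col low kv.2))) := by
    have h1 := pv_items_fold (fun kv => pvScoreA col low kv.2) dictionary PySem.Dict.empty hnd
      (fun k _ => PySem.Dict.contains_empty k)
    rw [show (dictionary.foldl (fun tmp kv => tmp.insert kv.1 (pvScoreA col low kv.2)) PySem.Dict.empty)
        = PySem.Dict.mk (dictionary.foldl (fun tmp kv => tmp.insert kv.1 (pvScoreA col low kv.2)) PySem.Dict.empty).items from rfl]
    rw [h1, ← hps]
    rfl
  have hkeys : (dictionary.map (fun kv => (kv.1, pvScoreB col low kv.2))).map Prod.fst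
      = dictionary.map Prod.fst := by
    simp
  have hA : pvNameA dictionary minscore col low
      = (let ps := dictionary.map (fun kv => (kv.1, pvScoreB col low kv.2))
         if ((ps.map Prod.snd).foldl (fun zeros v => if v ≠ 0 then zeros + 1 else zeros) (0 : Int)) = 0
            ∨ (PySem.List.max? (ps.map Prod.snd) (fun v => v)).getD 0 < minscore
         then "not found"
         else (PySem.List.max? (ps.map Prod.fst)
                (fun k => (PySem.Dict.mk ps).getD k 0)).getD "not found") := by
    unfold pvNameA
    rw [hd]
    rfl
  rw [hA]
  refine pv_core (dictionary.map (fun kv => (kv.1, pvScoreB col low kv.2))) _ minscore ?_ ?_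
  · intro p hp
    refine PySem.Dict.getD_of_mem_items _ ?_ ?_ 0
    · show (p.1, p.2) ∈ dictionary.map (fun kv => (kv.1, pvScoreB col low kv.2))
      simpa using hp
    · show ((PySem.Dict.mk (dictionary.map (fun kv => (kv.1, pvScoreB col low kv.2)))).keys).Nodup
      show ((dictionary.map (fun kv => (kv.1, pvScoreB col low kv.2))).map Prod.fst).Nodup
      rw [hkeys]; exact hnd
  · intro p hp
    obtain ⟨kv, -, rfl⟩ := List.mem_map.mp hp
    exact pv_score_nonneg col low kv.2

-- a fold whose step is a pointwise map commutes with the map (columns evolve independently)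
theorem pv_exchange {α β : Type} (g : β → α → α) : ∀ (l : List β) (bs : List α),
    l.foldl (fun bs kv => bs.map (g kv)) bs = bs.map (fun r => l.foldl (fun r kv => g kv r) r) := by
  intro l
  induction l with
  | nil => intro bs; simp
  | cons kv t ih =>
    intro bs
    simp only [List.foldl_cons]
    rw [ih, List.map_map]
    rfl

-- one column's record through B's key-outer fold is a first-argmax over its (key, score) pairs
theorem pv_fold_rec (c low : String) : ∀ (dict : List (String × List String)) (s : Int) (k : String),
    dict.foldl (fun r kv => pvStep kv.2 kv.1 r) (c, low, s, k)
    = (c, low,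
       (pvArgmax (dict.map (fun kv => (kv.1, pvScoreB c low kv.2))) (k, s)).2,
       (pvArgmax (dict.map (fun kv => (kv.1, pvScoreB c low kv.2))) (k, s)).1) := by
  intro dict
  induction dict with
  | nil => intro s k; simp [pvArgmax]
  | cons kv t ih =>
    intro s k
    simp only [List.foldl_cons, List.map_cons, pvArgmax, pvStep]
    by_cases h : s < pvScoreB c low kv.2
    · simp only [if_pos h]
      exact ih _ _
    · simp only [if_neg h]
      exact ih _ _

theorem pv_zip_map {α β : Type} (f : α → β) : ∀ (l : List α), l.zip (l.map f) = l.map (fun x => (x, f x)) := by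
  intro l
  induction l with
  | nil => rfl
  | cons x t ih => simp [ih]

-- ===== VERDICT (by name: the statement is the Claim_ definition above) =====
theorem rename_dict_spec : Claim_equal_rename_dict := by
  intro a_list dictionary minscore _ hpre
  unfold Spec_rename_dict
  simp only [rename_dict, rename_dict_alt]
  rw [pv_zip_map, List.foldl_map, pv_exchange, List.map_map]
  have hrec : ∀ c : String,
      ((fun r => dictionary.foldl (fun r kv => pvStep kv.2 kv.1 r) r) ∘
        fun c => (c, PySem.Str.lower c, (0 : Int), "not found")) c
      = (c, PySem.Str.lower c,
         (pvArgmax (dictionary.map (fun kv => (kv.1, pvScoreB c (PySem.Str.lower c) kv.2))) ("not found", 0)).2,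
         (pvArgmax (dictionary.map (fun kv => (kv.1, pvScoreB c (PySem.Str.lower c) kv.2))) ("not found", 0)).1) := by
    intro c
    exact pv_fold_rec c (PySem.Str.lower c) dictionary 0 "not found"
  rw [List.map_congr_left (fun c _ => hrec c), List.foldl_map]
  have hfun : (fun (d : PySem.Dict String String) (c : String) =>
      d.insert c (pvNameA dictionary minscore c (PySem.Str.lower c)))
      = (fun (d : PySem.Dict String String) (c : String) => d.insert c
          (if 0 < (pvArgmax (dictionary.map (fun kv => (kv.1, pvScoreB c (PySem.Str.lower c) kv.2))) ("not found", 0)).2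
              ∧ minscore ≤ (pvArgmax (dictionary.map (fun kv => (kv.1, pvScoreB c (PySem.Str.lower c) kv.2))) ("not found", 0)).2
           then (pvArgmax (dictionary.map (fun kv => (kv.1, pvScoreB c (PySem.Str.lower c) kv.2))) ("not found", 0)).1
           else "not found")) := by
    funext d c
    rw [pv_name_eq dictionary minscore c (PySem.Str.lower c) hpre]
  rw [hfun]
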